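-- pv_equiv track=rewrite | github.com/jylee425/algorithm_exercises | BOJ_5639.py | convert
-- ===== SOURCE A (Python) =====
-- def convert(preorder, postorder, start, end):
--     if start > end:
--         return
--
--     root = preorder[start]
--     mid = end + 1
--
--     # Find the first element greater than root
--     for i in range(start + 1, end + 1):
--         if preorder[i] > root:
--             mid = i
--             break
--
--     # Recursively convert left and right subtrees
--     convert(preorder, postorder, start + 1, mid - 1)
--     convert(preorder, postorder, mid, end)
--
--     # Append the root to the postorder list
--     postorder.append(root)
--
--     return postorder
-- ===== SOURCE B (Python) =====
-- def convert(preorder, postorder, start, end):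
--     # Iterative version: explicit stack of (start, end) segments, reverse-postorder
--     # built front-to-back, reversed once at the end (no recursion).
--     if start > end:
--         return
--     out = []
--     stack = [(start, end)]
--     while stack:
--         s, e = stack.pop()
--         if s > e:
--             continue
--         root = preorder[s]
--         mid = s + 1
--         while mid <= e and preorder[mid] <= root:
--             mid += 1
--         out.append(root)
--         stack.append((s + 1, mid - 1))
--         stack.append((mid, e))
--     postorder.extend(reversed(out))
--     return postorder
-- ===== Notes on version B (the rewrite author's own statement) =====
-- stated objective: alternative
-- what changed: Replaces the recursive tree descent that mutates the shared list with an iterative explicit-stack traversal that emits the reverse postorder front-to-back and reverses it once at the end.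
import Mathlib
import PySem

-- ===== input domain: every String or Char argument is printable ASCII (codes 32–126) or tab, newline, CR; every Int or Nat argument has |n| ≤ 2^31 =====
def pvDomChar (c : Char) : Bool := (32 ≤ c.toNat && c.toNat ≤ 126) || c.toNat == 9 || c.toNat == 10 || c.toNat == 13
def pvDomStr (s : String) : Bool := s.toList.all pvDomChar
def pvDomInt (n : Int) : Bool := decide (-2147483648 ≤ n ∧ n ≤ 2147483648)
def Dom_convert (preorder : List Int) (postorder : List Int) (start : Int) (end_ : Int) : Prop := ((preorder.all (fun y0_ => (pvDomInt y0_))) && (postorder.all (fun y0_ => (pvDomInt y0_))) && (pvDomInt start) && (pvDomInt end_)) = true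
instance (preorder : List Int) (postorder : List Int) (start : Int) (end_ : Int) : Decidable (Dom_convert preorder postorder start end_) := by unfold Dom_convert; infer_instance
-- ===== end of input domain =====

-- B replaces A's recursion (which mutates the shared output list) by an explicit-stack
-- iteration building the reverse postorder and reversing it once; equivalence is about the
-- return value, and both A and B append the same elements to `postorder` in place.

-- B replaces A's recursion (which mutates the shared output list) with an explicit-stack
-- iteration building the reverse postorder and reversing it once; equivalence is about the
-- return value, and both A and B append the same elements to `postorder` in place.

-- ===== PORT A =====

-- A's `for i in range(start+1, end+1): if preorder[i] > root: mid = i; break` scan.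
-- `fuel` is a totality guard only: it starts at the loop's exact trip count, so the
-- 0-case is reached exactly when i = e + 1 and the loop body never runs.
def findMidF (p : List Int) (root : Int) (e : Int) (fuel : Nat) (i : Int) : Int :=
  match fuel with
  | 0 => e + 1
  | fuel + 1 =>
    if i > e then e + 1
    else
      match PySem.List.pyGet? p i with
      | none => e + 1   -- IndexError (excluded by Pre_convert)
      | some v => if v > root then i else findMidF p root e fuel (i + 1)

def findMid (p : List Int) (root : Int) (i : Int) (e : Int) : Int :=
  findMidF p root e (e + 1 - i).toNat i

-- A's recursion; `fuel` is a totality guard starting at the segment length, so the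
-- 0-case is reached exactly when start > end_ (where Python returns None).
def convertF (p : List Int) (fuel : Nat) (post : List Int) (s : Int) (e : Int) : Option (List Int) :=
  match fuel with
  | 0 => none
  | fuel + 1 =>
    if s > e then none
    else
      match PySem.List.pyGet? p s with
      | none => none   -- IndexError (excluded by Pre_convert)
      | some root =>
        let mid := findMid p root (s + 1) e
        let p1 := (convertF p fuel post (s + 1) (mid - 1)).getD post
        let p2 := (convertF p fuel p1 mid e).getD p1
        some (p2 ++ [root])

def convert (preorder : List Int) (postorder : List Int) (start : Int) (end_ : Int) : Option (List Int) :=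
  convertF preorder (end_ + 1 - start).toNat postorder start end_

-- ===== PORT B =====

-- B's `mid = s+1; while mid <= e and preorder[mid] <= root: mid += 1` loop
-- (`fuel` = remaining trip count, a totality guard only).
def midWhileF (p : List Int) (root : Int) (e : Int) (fuel : Nat) (m : Int) : Int :=
  match fuel with
  | 0 => m
  | fuel + 1 =>
    if m > e then m
    else
      match PySem.List.pyGet? p m with
      | none => m   -- IndexError (excluded by Pre_convert)
      | some v => if v ≤ root then midWhileF p root e fuel (m + 1) else m

def midWhile (p : List Int) (root : Int) (m : Int) (e : Int) : Int :=
  midWhileF p root e (e + 1 - m).toNat m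

-- B's `while stack:` loop; `out` accumulates the reverse postorder
-- (`fuel` is a totality guard starting at a bound on the number of iterations).
def loopBF (p : List Int) (fuel : Nat) (stack : List (Int × Int)) (out : List Int) : List Int :=
  match fuel with
  | 0 => out
  | fuel + 1 =>
    match stack with
    | [] => out
    | (s, e) :: rest =>
      if s > e then loopBF p fuel rest out
      else
        match PySem.List.pyGet? p s with
        | none => out   -- IndexError (excluded by Pre_convert)
        | some root =>
          let mid := midWhile p root (s + 1) e
          loopBF p fuel ((mid, e) :: (s + 1, mid - 1) :: rest) (out ++ [root])

def loopB (p : List Int) (stack : List (Int × Int)) (out : List Int) : List Int :=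
  loopBF p ((stack.map (fun se => 2 * (se.2 + 1 - se.1).toNat + 1)).sum) stack out

def convert_alt (preorder : List Int) (postorder : List Int) (start : Int) (end_ : Int) : Option (List Int) :=
  if start > end_ then none
  else some (postorder ++ (loopB preorder [(start, end_)] []).reverse)

-- ===== PRECONDITION & SPEC =====

-- Pre_convert holds exactly where the Python A returns normally: when the segment is
-- nonempty every visited index start..end_ must be a valid (possibly negative) index,
-- otherwise preorder[start] raises IndexError.
def Pre_convert (preorder : List Int) (postorder : List Int) (start : Int) (end_ : Int) : Prop :=
  start > end_ ∨ (-(preorder.length : Int) ≤ start ∧ end_ < preorder.length)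
instance (preorder : List Int) (postorder : List Int) (start : Int) (end_ : Int) : Decidable (Pre_convert preorder postorder start end_) := by unfold Pre_convert; infer_instance

def pvWitness_convert : List Int × List Int × Int × Int := (([4, 2, 1, 3, 6, 5], [], 0, 5) : List Int × List Int × Int × Int)

def Spec_convert (preorder : List Int) (postorder : List Int) (start : Int) (end_ : Int) (out : Option (List Int)) : Prop := out = convert_alt preorder postorder start end_
instance (preorder : List Int) (postorder : List Int) (start : Int) (end_ : Int) (out : Option (List Int)) : Decidable (Spec_convert preorder postorder start end_ out) := by unfold Spec_convert; infer_instance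

-- ===== CLAIM (what is proved, stated in full; the proofs are below) =====
def Claim_equal_convert : Prop := ∀ (preorder : List Int) (postorder : List Int) (start : Int) (end_ : Int), Dom_convert preorder postorder start end_ → Pre_convert preorder postorder start end_ → Spec_convert preorder postorder start end_ (convert preorder postorder start end_)

-- ===== LEMMAS AND PROOFS =====

theorem pyGet?_isSome_of_range (p : List Int) (i : Int)
    (h1 : -(p.length : Int) ≤ i) (h2 : i < (p.length : Int)) :
    ∃ v, PySem.List.pyGet? p i = some v := by
  cases hg : PySem.List.pyGet? p i with
  | some v => exact ⟨v, rfl⟩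
  | none =>
      rw [PySem.List.pyGet?_eq_none_iff] at hg
      exact absurd ⟨h1, h2⟩ hg

theorem findMidF_bounds (p : List Int) (root : Int) (e : Int) : ∀ (fuel : Nat) (i : Int),
    (e + 1 - i).toNat ≤ fuel → i ≤ e + 1 →
    i ≤ findMidF p root e fuel i ∧ findMidF p root e fuel i ≤ e + 1 := by
  intro fuel
  induction fuel with
  | zero => intro i hk hie; simp only [findMidF]; omega
  | succ fuel ih =>
    intro i hk hie
    simp only [findMidF]
    by_cases hgt : i > e
    · rw [if_pos hgt]; omega
    · rw [if_neg hgt]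
      cases hg : PySem.List.pyGet? p i with
      | none => simp only []; omega
      | some v =>
        simp only []
        by_cases hv : v > root
        · rw [if_pos hv]; omega
        · rw [if_neg hv]
          have := ih (i + 1) (by omega) (by omega); omega

theorem findMid_bounds (p : List Int) (root : Int) (i : Int) (e : Int) (h : i ≤ e + 1) :
    i ≤ findMid p root i e ∧ findMid p root i e ≤ e + 1 :=
  findMidF_bounds p root e (e + 1 - i).toNat i le_rfl h

theorem midWhileF_bounds (p : List Int) (root : Int) (e : Int) : ∀ (fuel : Nat) (m : Int),
    (e + 1 - m).toNat ≤ fuel → m ≤ e + 1 →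
    m ≤ midWhileF p root e fuel m ∧ midWhileF p root e fuel m ≤ e + 1 := by
  intro fuel
  induction fuel with
  | zero => intro m hk hme; simp only [midWhileF]; omega
  | succ fuel ih =>
    intro m hk hme
    simp only [midWhileF]
    by_cases hgt : m > e
    · rw [if_pos hgt]; omega
    · rw [if_neg hgt]
      cases hg : PySem.List.pyGet? p m with
      | none => simp only []; omega
      | some v =>
        simp only []
        by_cases hv : v ≤ root
        · rw [if_pos hv]
          have := ih (m + 1) (by omega) (by omega); omega
        · rw [if_neg hv]; omega

theorem midWhile_bounds (p : List Int) (root : Int) (m : Int) (e : Int) (h : m ≤ e + 1) :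
    m ≤ midWhile p root m e ∧ midWhile p root m e ≤ e + 1 :=
  midWhileF_bounds p root e (e + 1 - m).toNat m le_rfl h

-- the postorder word of the segment [s, e], following A's split
def seg (p : List Int) (s : Int) (e : Int) : List Int :=
  if _h : s > e then []
  else
    match PySem.List.pyGet? p s with
    | none => []
    | some root =>
      let mid := findMid p root (s + 1) e
      seg p (s + 1) (mid - 1) ++ seg p mid e ++ [root]
termination_by (e + 1 - s).toNat
decreasing_by
  · have := findMid_bounds p root (s + 1) e (by omega); omega
  · have := findMid_bounds p root (s + 1) e (by omega); omega

theorem seg_unfold (p : List Int) (s : Int) (e : Int) (root : Int)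
    (hse : ¬ s > e) (hget : PySem.List.pyGet? p s = some root) :
    seg p s e = seg p (s + 1) (findMid p root (s + 1) e - 1) ++ seg p (findMid p root (s + 1) e) e ++ [root] := by
  rw [seg, dif_neg hse]
  simp only [hget]

theorem convertF_none (p : List Int) (fuel : Nat) (post : List Int) (s : Int) (e : Int)
    (hse : s > e) : convertF p fuel post s e = none := by
  cases fuel with
  | zero => simp [convertF]
  | succ fuel => simp [convertF, if_pos hse]

theorem conv_seg (p : List Int) : ∀ (fuel : Nat) (s e : Int) (post : List Int),
    (e + 1 - s).toNat ≤ fuel → -(p.length : Int) ≤ s → e < (p.length : Int) → s ≤ e →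
    convertF p fuel post s e = some (post ++ seg p s e) := by
  intro fuel
  induction fuel with
  | zero => intro s e post hk _ _ hse; omega
  | succ fuel ih =>
    intro s e post hk h1 h2 hse
    obtain ⟨root, hget⟩ := pyGet?_isSome_of_range p s h1 (by omega)
    have hmb := findMid_bounds p root (s + 1) e (by omega)
    have hL : ∀ q : List Int, (convertF p fuel q (s + 1) (findMid p root (s + 1) e - 1)).getD q
        = q ++ seg p (s + 1) (findMid p root (s + 1) e - 1) := by
      intro q
      by_cases hc : s + 1 ≤ findMid p root (s + 1) e - 1
      · rw [ih (s + 1) _ q (by omega) (by omega) (by omega) hc]; simp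
      · rw [convertF_none p fuel q _ _ (by omega), seg,
            dif_pos (by omega : s + 1 > findMid p root (s + 1) e - 1)]
        simp
    have hR : ∀ q : List Int, (convertF p fuel q (findMid p root (s + 1) e) e).getD q
        = q ++ seg p (findMid p root (s + 1) e) e := by
      intro q
      by_cases hc : findMid p root (s + 1) e ≤ e
      · rw [ih _ e q (by omega) (by omega) h2 hc]; simp
      · rw [convertF_none p fuel q _ _ (by omega), seg,
            dif_pos (by omega : findMid p root (s + 1) e > e)]
        simp
    rw [show convertF p (fuel + 1) post s e
        = (if s > e then none
           else match PySem.List.pyGet? p s with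
           | none => none
           | some root =>
             let mid := findMid p root (s + 1) e
             let p1 := (convertF p fuel post (s + 1) (mid - 1)).getD post
             let p2 := (convertF p fuel p1 mid e).getD p1
             some (p2 ++ [root])) from rfl]
    rw [if_neg (by omega : ¬ s > e), seg_unfold p s e root (by omega) hget]
    simp only [hget, hL, hR, List.append_assoc]

theorem mid_eq (p : List Int) : ∀ (fuel : Nat) (m e root : Int), (e + 1 - m).toNat ≤ fuel →
    m ≤ e + 1 → -(p.length : Int) ≤ m → e < (p.length : Int) →
    midWhileF p root e fuel m = findMid p root m e := by
  intro fuel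
  induction fuel with
  | zero =>
    intro m e root hk hme h1 h2
    have h0 : (e + 1 - m).toNat = 0 := by omega
    simp only [midWhileF, findMid, h0, findMidF]
    omega
  | succ fuel ih =>
    intro m e root hk hme h1 h2
    by_cases hgt : m > e
    · have h0 : (e + 1 - m).toNat = 0 := by omega
      simp only [midWhileF, if_pos hgt, findMid, h0, findMidF]
      omega
    · obtain ⟨v, hget⟩ := pyGet?_isSome_of_range p m h1 (by omega)
      have hsz : (e + 1 - m).toNat = (e + 1 - (m + 1)).toNat + 1 := by omega
      rw [findMid, hsz]
      simp only [midWhileF, findMidF, if_neg hgt, hget]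
      by_cases hv : v ≤ root
      · rw [if_pos hv, if_neg (by omega : ¬ v > root)]
        have := ih (m + 1) e root (by omega) (by omega) (by omega) h2
        rw [findMid] at this
        exact this
      · rw [if_neg hv, if_pos (by omega : v > root)]

theorem loop_seg (p : List Int) : ∀ (fuel : Nat) (stack : List (Int × Int)) (out : List Int),
    (stack.map (fun se => 2 * (se.2 + 1 - se.1).toNat + 1)).sum ≤ fuel →
    (∀ se ∈ stack, se.1 > se.2 ∨ (-(p.length : Int) ≤ se.1 ∧ se.2 < (p.length : Int))) →
    loopBF p fuel stack out = out ++ (stack.map (fun se => (seg p se.1 se.2).reverse)).flatten := by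
  intro fuel
  induction fuel with
  | zero =>
    intro stack out hk _
    cases stack with
    | nil => simp [loopBF]
    | cons hd tl => simp only [List.map_cons, List.sum_cons] at hk; omega
  | succ fuel ih =>
    intro stack out hk hv
    cases stack with
    | nil => simp [loopBF]
    | cons hd tl =>
      obtain ⟨s, e⟩ := hd
      simp only [List.map_cons, List.sum_cons] at hk
      by_cases hse : s > e
      · simp only [loopBF, if_pos hse]
        rw [ih tl out (by omega) (fun se hm => hv se (List.mem_cons_of_mem _ hm))]
        simp only [List.map_cons, List.flatten_cons]
        rw [seg, dif_pos hse]
        simp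
      · rcases hv (s, e) List.mem_cons_self with h | ⟨h1, h2⟩
        · exact absurd h hse
        · obtain ⟨root, hget⟩ := pyGet?_isSome_of_range p s h1 (by omega)
          have hmb := midWhile_bounds p root (s + 1) e (by omega)
          simp only [loopBF, if_neg hse, hget]
          rw [ih ((midWhile p root (s + 1) e, e) :: (s + 1, midWhile p root (s + 1) e - 1) :: tl)
              (out ++ [root])
              (by simp only [List.map_cons, List.sum_cons]; omega)
              (by
                intro se hm
                rcases List.mem_cons.mp hm with h | hm2
                · subst h; by_cases hc : midWhile p root (s + 1) e > e
                  · exact Or.inl hc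
                  · exact Or.inr ⟨by omega, h2⟩
                rcases List.mem_cons.mp hm2 with h | hm3
                · subst h; by_cases hc : s + 1 > midWhile p root (s + 1) e - 1
                  · exact Or.inl hc
                  · exact Or.inr ⟨by omega, by omega⟩
                · exact hv se (List.mem_cons_of_mem _ hm3))]
          simp only [List.map_cons, List.flatten_cons]
          rw [seg_unfold p s e root hse hget]
          rw [show midWhile p root (s + 1) e
              = midWhileF p root e (e + 1 - (s + 1)).toNat (s + 1) from rfl,
            mid_eq p (e + 1 - (s + 1)).toNat (s + 1) e root le_rfl (by omega) (by omega) h2]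
          simp [List.append_assoc]

-- ===== VERDICT (by name: the statement is the Claim_ definition above) =====
theorem convert_spec : Claim_equal_convert := by
  intro preorder postorder start end_ _ hpre
  unfold Spec_convert convert_alt
  by_cases h : start > end_
  · rw [if_pos h, convert, convertF_none preorder _ postorder start end_ h]
  · rcases hpre with hgt | ⟨h1, h2⟩
    · exact absurd hgt h
    · rw [if_neg h, convert]
      rw [conv_seg preorder (end_ + 1 - start).toNat start end_ postorder le_rfl h1 h2 (by omega)]
      rw [show loopB preorder [(start, end_)] []
          = loopBF preorder (2 * (end_ + 1 - start).toNat + 1) [(start, end_)] [] from by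
            simp [loopB]]
      rw [loop_seg preorder (2 * (end_ + 1 - start).toNat + 1) [(start, end_)] []
          (by simp) (by
            intro se hm
            rcases List.mem_cons.mp hm with hse | hse
            · subst hse; exact Or.inr ⟨h1, h2⟩
            · simp at hse)]
      simp
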